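-- pv_equiv track=rewrite | github.com/mozilla/kitsune | scripts/peep.py | requirement_args
-- ===== SOURCE A (Python) =====
-- def requirement_args(argv, want_paths=False, want_other=False):
--     """Return an iterable of filtered arguments.
--
--     :arg want_paths: If True, the returned iterable includes the paths to any
--         requirements files following a ``-r`` or ``--requirement`` option.
--     :arg want_other: If True, the returned iterable includes the args that are
--         not a requirement-file path or a ``-r`` or ``--requirement`` flag.
--
--     """
--     was_r = False
--     for arg in argv:
--         # Allow for requirements files named "-r", don't freak out if there's a
--         # trailing "-r", etc.
--         if was_r:
--             if want_paths:
--                 yield arg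
--             was_r = False
--         elif arg in ['-r', '--requirement']:
--             was_r = True
--         else:
--             if want_other:
--                 yield arg
-- ===== SOURCE B (Python) =====
-- def requirement_args(argv, want_paths=False, want_other=False):
--     """Return an iterable of filtered arguments (two-stage rewrite).
--
--     Stage 1 classifies every position as 'flag', 'path' or 'other' without
--     looking at the want_* switches; stage 2 filters by role.
--     """
--     args = list(argv)
--     roles = []
--     expecting = False
--     for a in args:
--         if expecting:
--             roles.append('path')
--             expecting = False
--         elif a in ('-r', '--requirement'):
--             roles.append('flag')
--             expecting = True
--         else:
--             roles.append('other')
--     for a, role in zip(args, roles):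
--         if (role == 'path' and want_paths) or (role == 'other' and want_other):
--             yield a
-- ===== Notes on version B (the rewrite author's own statement) =====
-- stated objective: alternative
-- what changed: Replaced A's single filtering state-machine loop with two staged passes: a classification pass that labels every position as flag/path/other independently of the want_* switches, then a separate filter pass over the zipped (arg, role) pairs.
import Mathlib
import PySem

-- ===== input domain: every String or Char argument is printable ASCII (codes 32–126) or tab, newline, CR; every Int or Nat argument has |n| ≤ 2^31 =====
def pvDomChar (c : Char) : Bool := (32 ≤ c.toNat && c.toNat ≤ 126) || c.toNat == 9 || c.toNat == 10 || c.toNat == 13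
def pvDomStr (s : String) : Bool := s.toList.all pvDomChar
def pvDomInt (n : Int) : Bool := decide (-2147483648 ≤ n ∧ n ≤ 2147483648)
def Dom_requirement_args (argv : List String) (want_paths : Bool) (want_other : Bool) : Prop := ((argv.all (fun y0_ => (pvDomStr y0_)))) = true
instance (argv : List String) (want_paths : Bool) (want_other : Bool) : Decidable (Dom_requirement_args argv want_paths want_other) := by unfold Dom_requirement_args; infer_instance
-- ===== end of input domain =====

-- B replaces A's single filtering state-machine loop with two staged passes: a role-classification pass (ignoring the want_* switches) followed by a filter over the zipped (arg, role) pairs (alternative decomposition, same cost).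
-- ===== PORT A =====
-- was_r-flag loop, step for step: state is the carried was_r boolean
def requirement_args_go (want_paths : Bool) (want_other : Bool) : List String → Bool → List String
  | [], _ => []
  | arg :: rest, true =>
      (if want_paths then [arg] else []) ++ requirement_args_go want_paths want_other rest false
  | arg :: rest, false =>
      if arg = "-r" ∨ arg = "--requirement" then
        requirement_args_go want_paths want_other rest true
      else
        (if want_other then [arg] else []) ++ requirement_args_go want_paths want_other rest false

def requirement_args (argv : List String) (want_paths : Bool) (want_other : Bool) : List String :=
  requirement_args_go want_paths want_other argv false

-- ===== PORT B =====
-- stage 1: classify every position as path/flag/other (carried 'expecting' boolean, no want_* involved)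
inductive PvRole : Type
  | path : PvRole
  | flag : PvRole
  | other : PvRole
deriving DecidableEq, Repr

def pvRoles : List String → Bool → List PvRole
  | [], _ => []
  | _ :: rest, true => PvRole.path :: pvRoles rest false
  | a :: rest, false =>
      if a = "-r" ∨ a = "--requirement" then PvRole.flag :: pvRoles rest true
      else PvRole.other :: pvRoles rest false

-- stage 2: filter the zipped (arg, role) pairs by role
def requirement_args_alt (argv : List String) (want_paths : Bool) (want_other : Bool) : List String :=
  (argv.zip (pvRoles argv false)).foldl
    (fun acc p =>
      if (p.2 = PvRole.path ∧ want_paths = true) ∨ (p.2 = PvRole.other ∧ want_other = true) then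
        acc ++ [p.1]
      else acc) []

-- ===== PRECONDITION & SPEC =====
def Spec_requirement_args (argv : List String) (want_paths : Bool) (want_other : Bool) (out : List String) : Prop := out = requirement_args_alt argv want_paths want_other
instance (argv : List String) (want_paths : Bool) (want_other : Bool) (out : List String) : Decidable (Spec_requirement_args argv want_paths want_other out) := by unfold Spec_requirement_args; infer_instance

-- ===== CLAIM (what is proved, stated in full; the proofs are below) =====
def Claim_equal_requirement_args : Prop := ∀ (argv : List String) (want_paths : Bool) (want_other : Bool), Dom_requirement_args argv want_paths want_other → Spec_requirement_args argv want_paths want_other (requirement_args argv want_paths want_other)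

-- ===== LEMMAS AND PROOFS =====
-- key: B's fold over the zipped roles, started from any accumulator, appends exactly A's state-machine output for the same was_r state.
theorem pv_key (want_paths want_other : Bool) :
    ∀ (l : List String) (b : Bool) (acc : List String),
      (l.zip (pvRoles l b)).foldl
        (fun acc p =>
          if (p.2 = PvRole.path ∧ want_paths = true) ∨ (p.2 = PvRole.other ∧ want_other = true) then
            acc ++ [p.1]
          else acc) acc
      = acc ++ requirement_args_go want_paths want_other l b := by
  intro l
  induction l with
  | nil => intro b acc; simp [pvRoles, requirement_args_go]
  | cons a rest ih =>
      intro b acc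
      cases b with
      | true =>
          have hz : ((a :: rest).zip (pvRoles (a :: rest) true))
              = (a, PvRole.path) :: rest.zip (pvRoles rest false) := by
            simp [pvRoles]
          rw [hz, List.foldl_cons, ih, requirement_args_go]
          cases want_paths <;> simp
      | false =>
          by_cases h : a = "-r" ∨ a = "--requirement"
          · have hz : ((a :: rest).zip (pvRoles (a :: rest) false))
                = (a, PvRole.flag) :: rest.zip (pvRoles rest true) := by
              simp [pvRoles, h]
            rw [hz, List.foldl_cons, ih]
            simp [requirement_args_go, h]
          · have hz : ((a :: rest).zip (pvRoles (a :: rest) false))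
                = (a, PvRole.other) :: rest.zip (pvRoles rest false) := by
              simp [pvRoles, h]
            rw [hz, List.foldl_cons, ih]
            cases want_other <;> simp [requirement_args_go, h]

-- ===== VERDICT (by name: the statement is the Claim_ definition above) =====
theorem requirement_args_spec : Claim_equal_requirement_args := by
  intro argv want_paths want_other _
  unfold Spec_requirement_args requirement_args requirement_args_alt
  simp [pv_key]
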